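-- pv_equiv track=rewrite | github.com/OpenBEL/openbel-contributions | resource_generator/test.py | verbose
-- ===== SOURCE A (Python) =====
-- def verbose(d):
--     for dis, rep in d.items():
--         if rep == "-":
--             d[dis] = None
--             continue
--
--         while rep in d:
--             rep = d[rep]
--             if rep == "-":
--                 d[dis] = None
--                 break
--         #else:
--         d[dis] = rep
--     return d
-- ===== SOURCE B (Python) =====
-- # B: memoized recursive resolution (path compression): each key's chain is resolved once
-- # and remembered, instead of A's per-key while-loop chain walking. Mutates d in place like A
-- # (return value equivalence is what is proved). On chains that reach "-" after at least one
-- # hop through keys not yet rewritten, A leaks the literal "-" (its "#else" comment shows the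
-- # intended while/else); B returns None there as intended.
-- def verbose(d):
--     def resolve(k, src, memo):
--         if k not in memo:
--             v = src[k]
--             if v == "-":
--                 memo[k] = None
--             elif v in src:
--                 memo[k] = resolve(v, src, memo)
--             else:
--                 memo[k] = v
--         return memo[k]
--
--     src = dict(d)
--     memo = {}
--     for k in src:
--         d[k] = resolve(k, src, memo)
--     return d
-- ===== Notes on version B (the rewrite author's own statement) =====
-- stated objective: alternative
-- what changed: A re-walks each key's replacement chain with a while loop over the evolving dict; B resolves each key once by memoized recursion over a snapshot (path compression), so every chain link is followed at most once.
-- intended difference: On inputs where some key's replacement chain reaches the sentinel '-' after at least one hop through keys at or after its own position, A stores the literal string '-' for that key (its commented-out '#else' shows the intended while/else), while B stores None — the sentinel's meaning, exactly what A's own first branch does for a direct '-'. — e.g. on verbose([("a", "b"), ("b", "-")]): A returns [("a", some "-"), ("b", none)], B returns [("a", none), ("b", none)]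
import Mathlib
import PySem

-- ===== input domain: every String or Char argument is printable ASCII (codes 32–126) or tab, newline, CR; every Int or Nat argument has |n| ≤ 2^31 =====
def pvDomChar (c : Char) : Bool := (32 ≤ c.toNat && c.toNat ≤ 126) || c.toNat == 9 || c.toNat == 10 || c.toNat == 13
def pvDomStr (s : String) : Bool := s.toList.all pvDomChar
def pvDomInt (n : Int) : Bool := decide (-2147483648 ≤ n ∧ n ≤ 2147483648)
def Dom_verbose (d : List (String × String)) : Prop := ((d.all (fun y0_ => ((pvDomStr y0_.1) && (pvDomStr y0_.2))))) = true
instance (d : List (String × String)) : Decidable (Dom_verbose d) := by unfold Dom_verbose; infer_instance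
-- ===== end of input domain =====

-- B resolves each key once by memoized recursion where A re-walks the chain per key with a
-- while loop; both mutate the dict in place in Python; the equivalence proved is about the
-- return value.

-- ===== PORT A =====
-- the while loop of A: walks `rep` through the evolving dict; on reading "-" it stores None
-- for `dis` and breaks (the caller then overwrites with rep, i.e. "-", as A's code does).
-- fuel is a totality artifact: under Pre_verbose (acyclic chains) it is never exhausted.
def verboseChase (st : PySem.Dict String (Option String)) (dis : String)
    (rep : Option String) : Nat → (PySem.Dict String (Option String)) × Option String
  | 0 => (st, rep)
  | fuel+1 =>
    match rep with
    | none => (st, none)                     -- `None in d` is False: loop exits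
    | some r =>
      match st.get? r with
      | none => (st, some r)                 -- `rep in d` is False: loop exits
      | some rep' =>
        if rep' = some "-" then (st.insert dis none, rep')   -- d[dis] = None; break
        else verboseChase st dis rep' fuel

-- the body of A's for loop, for one key dis (n is the dict size, used only for fuel)
def verboseStep (n : Nat) (st : PySem.Dict String (Option String)) (dis : String) :
    PySem.Dict String (Option String) :=
  match st.get? dis with
  | none => st                               -- unreachable: dis is a key of st
  | some rep =>
    if rep = some "-" then st.insert dis none
    else
      let p := verboseChase st dis rep (n + 2)
      p.1.insert dis p.2

def verbose (d : List (String × String)) : List (String × Option String) :=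
  let st0 : PySem.Dict String (Option String) := PySem.Dict.mk (d.map (fun kv => (kv.1, some kv.2)))
  let final := st0.keys.foldl (verboseStep d.length) st0
  final.items

-- ===== PORT B =====
-- Source B's `resolve`: memoized recursion; returns the updated memo and the resolved value.
-- fuel is a totality artifact: recursion depth is bounded by the chain length under Pre_verbose.
def resolveB (src : PySem.Dict String String) (memo : PySem.Dict String (Option String))
    (k : String) : Nat → (PySem.Dict String (Option String)) × Option String
  | 0 => (memo, none)
  | fuel+1 =>
    match memo.get? k with
    | some r => (memo, r)
    | none =>
      match src.get? k with
      | none => (memo, none)                 -- unreachable: resolve is only called on keys of src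
      | some v =>
        if v = "-" then (memo.insert k none, none)
        else if src.contains v then
          let p := resolveB src memo v fuel
          (p.1.insert k p.2, p.2)
        else (memo.insert k (some v), some v)

-- the body of Source B's for loop: resolve key k and record d[k] = its value
def verboseAltStep (src : PySem.Dict String String) (n : Nat)
    (acc : (PySem.Dict String (Option String)) × List (String × Option String)) (k : String) :
    (PySem.Dict String (Option String)) × List (String × Option String) :=
  let p := resolveB src acc.1 k (n + 2)
  (p.1, acc.2 ++ [(k, p.2)])

def verbose_alt (d : List (String × String)) : List (String × Option String) :=
  let src : PySem.Dict String String := PySem.Dict.mk d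
  let r := src.keys.foldl (verboseAltStep src d.length) (PySem.Dict.empty, [])
  r.2

-- ===== PRECONDITION & SPEC =====
-- one replacement step of the chain both programs follow: from x to d[x], unless x is the
-- sentinel "-" or x is not a key
def pvSucc (d : List (String × String)) (x : String) : Option String :=
  if x = "-" then none else (PySem.Dict.mk d).get? x

def pvIter (d : List (String × String)) : Nat → String → Option String
  | 0, x => some x
  | j+1, x =>
    match pvSucc d x with
    | none => none
    | some y => pvIter d j y

-- Pre_ excludes (a) lists with duplicate keys, where the first-match association-list reading
-- and Python's dict reading (last occurrence wins) of the same input disagree, and (b) cyclic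
-- replacement chains, on which Python A's while loop never terminates (A diverges there).
def Pre_verbose (d : List (String × String)) : Prop :=
  (d.map Prod.fst).Nodup ∧
  ∀ x ∈ d.map Prod.fst, ∀ j < d.length, pvIter d (j+1) x ≠ some x
instance (d : List (String × String)) : Decidable (Pre_verbose d) := by
  unfold Pre_verbose; infer_instance

def pvWitness_verbose : (List (String × String)) := [("a", "b"), ("b", "c"), ("c", "x")]

-- walk the replacement chain inside the suffix s: true iff it meets the sentinel "-"
def pvHit (s : List (String × String)) : String → Nat → Bool
  | _, 0 => false
  | v, f+1 =>
    match (PySem.Dict.mk s).get? v with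
    | some w => w = "-" || pvHit s w f
    | none => false

-- A's evident bug (note the dead "#else" comment in its source): when some key's replacement
-- chain reaches the sentinel "-" after at least one hop, travelling only through keys at or
-- after that key's position (a suffix s of d), A stores the literal string "-" for it; B
-- stores None (the sentinel's meaning, exactly what A's first branch does for a direct "-").
def D_verbose (d : List (String × String)) : Prop :=
  ∃ s ∈ d.tails, (s.headD ("", "")).2 ≠ "-" ∧
    pvHit s (s.headD ("", "")).2 (d.length + 1) = true
instance (d : List (String × String)) : Decidable (D_verbose d) := by
  unfold D_verbose; infer_instance

def Spec_verbose (d : List (String × String)) (out : List (String × Option String)) : Prop :=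
  ¬ D_verbose d → out = verbose_alt d
instance (d : List (String × String)) (out : List (String × Option String)) : Decidable (Spec_verbose d out) := by
  unfold Spec_verbose; infer_instance

def pvDiffWitness_verbose : (List (String × String)) := [("a", "b"), ("b", "-")]
def pvDiffWitnessOut_verbose : (List (String × Option String)) × (List (String × Option String)) :=
  ([("a", some "-"), ("b", none)], [("a", none), ("b", none)])

-- ===== CLAIM (what is proved, stated in full; the proofs are below) =====
def Claim_unchanged_verbose : Prop := ∀ (d : List (String × String)), Dom_verbose d → Pre_verbose d → Spec_verbose d (verbose d)
def Claim_exact_verbose : Prop := ∀ (d : List (String × String)), Dom_verbose d → Pre_verbose d → D_verbose d → verbose d ≠ verbose_alt d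
def Claim_changed_verbose : Prop := Dom_verbose (pvDiffWitness_verbose) ∧ Pre_verbose (pvDiffWitness_verbose) ∧ D_verbose (pvDiffWitness_verbose) ∧ verbose (pvDiffWitness_verbose) = pvDiffWitnessOut_verbose.1 ∧ verbose_alt (pvDiffWitness_verbose) = pvDiffWitnessOut_verbose.2 ∧ pvDiffWitnessOut_verbose.1 ≠ pvDiffWitnessOut_verbose.2

-- ===== LEMMAS AND PROOFS =====

-- the pure value a chain resolves to: follow values through keys; "-" means none,
-- a non-key value is the terminal
def pvRes (d : List (String × String)) : Nat → String → Option String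
  | 0, _ => none
  | fuel+1, v =>
    if v = "-" then none
    else
      match (PySem.Dict.mk d).get? v with
      | none => some v
      | some w => pvRes d fuel w


-- ---- basic dictionary facts ----

theorem pvLk_of_mem {d : List (String × String)} {k v : String}
    (hnd : (d.map Prod.fst).Nodup) (h : (k, v) ∈ d) :
    (PySem.Dict.mk d).get? k = some v := by
  exact PySem.Dict.get?_of_mem_items _ (by simpa using h) (by simpa [PySem.Dict.keys_mk] using hnd)

theorem pvLk_none_iff (d : List (String × String)) (x : String) :
    (PySem.Dict.mk d).get? x = none ↔ x ∉ d.map Prod.fst := by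
  simpa [PySem.Dict.keys_mk] using PySem.Dict.get?_eq_none_iff_not_mem_keys (PySem.Dict.mk d) x

-- ---- pvIter (chain iteration) facts ----

theorem pvIter_bind_succ (d : List (String × String)) :
    ∀ (j : Nat) (x : String), pvIter d (j+1) x = (pvIter d j x).bind (pvSucc d) := by
  intro j
  induction j with
  | zero => intro x; cases h : pvSucc d x <;> simp [pvIter, h]
  | succ j ih =>
    intro x
    show pvIter d (j+1+1) x = _
    rw [show (j+1+1) = (j+1)+1 from rfl]
    cases h : pvSucc d x with
    | none => simp [pvIter, h]
    | some y => simp only [pvIter, h]; exact ih y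

theorem pvIter_add (d : List (String × String)) :
    ∀ (a b : Nat) (x : String), pvIter d (a + b) x = (pvIter d a x).bind (pvIter d b) := by
  intro a
  induction a with
  | zero => intro b x; simp [pvIter]
  | succ a ih =>
    intro b x
    have h1 : a + 1 + b = (a + b) + 1 := by omega
    rw [h1]
    cases h : pvSucc d x with
    | none => simp [pvIter, h]
    | some y => simp only [pvIter, h]; exact ih b y

theorem pvIter_none_mono {d : List (String × String)} :
    ∀ {j j' : Nat} {x : String}, pvIter d j x = none → j ≤ j' → pvIter d j' x = none := by
  intro j j' x h hle
  obtain ⟨k, rfl⟩ := Nat.le.dest hle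
  rw [pvIter_add, h]
  rfl

-- every chain is dead after length+1 steps (pigeonhole from the acyclicity in Pre_)
theorem pvIter_dead {d : List (String × String)}
    (hacyc : ∀ x ∈ d.map Prod.fst, ∀ j < d.length, pvIter d (j+1) x ≠ some x)
    (v : String) : pvIter d (d.length + 1) v = none := by
  by_contra h
  have alive : ∀ j ≤ d.length + 1, pvIter d j v ≠ none := by
    intro j hj hnone
    exact h (pvIter_none_mono hnone hj)
  have hz : ∀ j ≤ d.length + 1, pvIter d j v = some ((pvIter d j v).getD "") := by
    intro j hj
    cases hc : pvIter d j v with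
    | none => exact absurd hc (alive j hj)
    | some y => simp
  have hkey : ∀ j ≤ d.length, ((pvIter d j v).getD "") ∈ d.map Prod.fst := by
    intro j hj
    have h1 := hz j (by omega)
    have h2 : pvIter d (j+1) v ≠ none := alive (j+1) (by omega)
    rw [pvIter_bind_succ, h1] at h2
    simp only [Option.bind_some] at h2
    by_contra hmem
    have : (PySem.Dict.mk d).get? ((pvIter d j v).getD "") = none := (pvLk_none_iff d _).2 hmem
    simp [pvSucc, this] at h2
  have hinj : ∀ a ≤ d.length, ∀ b ≤ d.length, a < b →
      (pvIter d a v).getD "" ≠ (pvIter d b v).getD "" := by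
    intro a ha b hb hab heq
    have h1 := hz a (by omega)
    have h2 := hz b (by omega)
    have hsplit : pvIter d b v = pvIter d (b - a) ((pvIter d a v).getD "") := by
      have : b = a + (b - a) := by omega
      rw [this, pvIter_add, h1]
      simp
    have : pvIter d ((b - a - 1) + 1) ((pvIter d a v).getD "") = some ((pvIter d a v).getD "") := by
      have hba : (b - a - 1) + 1 = b - a := by omega
      rw [hba, ← hsplit, h2, ← heq]
    exact hacyc _ (hkey a ha) (b - a - 1) (by omega) this
  -- pigeonhole: d.length + 1 distinct members of a Nodup list of length d.length
  have hnodupL : ((List.range (d.length + 1)).map (fun j => (pvIter d j v).getD "")).Nodup := by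
    refine (List.nodup_map_iff_inj_on List.nodup_range).2 ?_
    intro a ha b hb heq
    simp only [List.mem_range] at ha hb
    by_contra hne
    rcases Nat.lt_or_ge a b with hlt | hge
    · exact hinj a (by omega) b (by omega) hlt heq
    · have : b < a := by omega
      exact hinj b (by omega) a (by omega) this heq.symm
  have hsub : ((List.range (d.length + 1)).map (fun j => (pvIter d j v).getD "")) ⊆ d.map Prod.fst := by
    intro y hy
    simp only [List.mem_map, List.mem_range] at hy
    rcases hy with ⟨j, hj, rfl⟩
    exact hkey j (by omega)
  have hlen : ((List.range (d.length + 1)).map (fun j => (pvIter d j v).getD "")).length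
      ≤ (d.map Prod.fst).length :=
    calc ((List.range (d.length + 1)).map (fun j => (pvIter d j v).getD "")).length
        = ((List.range (d.length + 1)).map (fun j => (pvIter d j v).getD "")).toFinset.card :=
          (List.toFinset_card_of_nodup hnodupL).symm
      _ ≤ (d.map Prod.fst).toFinset.card :=
          Finset.card_le_card (fun x hx => List.mem_toFinset.2 (hsub (List.mem_toFinset.1 hx)))
      _ ≤ (d.map Prod.fst).length := List.toFinset_card_le _
  simp at hlen

-- ---- pvRes (the resolved value) facts ----

theorem pvRes_ne_dash (d : List (String × String)) :
    ∀ (f : Nat) (v : String), pvRes d f v ≠ some "-" := by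
  intro f
  induction f with
  | zero => intro v; simp [pvRes]
  | succ f ih =>
    intro v
    by_cases hv : v = "-"
    · simp [pvRes, hv]
    · cases h : (PySem.Dict.mk d).get? v with
      | none => simp [pvRes, hv, h]
      | some w => simpa only [pvRes, hv, if_false, h] using ih w

theorem pvRes_some_not_key {d : List (String × String)} :
    ∀ {f : Nat} {v t : String}, pvRes d f v = some t → (PySem.Dict.mk d).get? t = none := by
  intro f
  induction f with
  | zero => intro v t h; simp [pvRes] at h
  | succ f ih =>
    intro v t h
    by_cases hv : v = "-"
    · simp [pvRes, hv] at h
    · cases hc : (PySem.Dict.mk d).get? v with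
      | none => simp [pvRes, hv, hc] at h; subst h; exact hc
      | some w => simp only [pvRes, hv, if_false, hc] at h; exact ih h

theorem pvRes_congr_dead {d : List (String × String)} :
    ∀ {m : Nat} {v : String} {f1 f2 : Nat}, pvIter d m v = none → m ≤ f1 → m ≤ f2 →
      pvRes d f1 v = pvRes d f2 v := by
  intro m
  induction m with
  | zero => intro v f1 f2 h; simp [pvIter] at h
  | succ m ih =>
    intro v f1 f2 h h1 h2
    obtain ⟨g1, rfl⟩ : ∃ g1, f1 = g1 + 1 := ⟨f1 - 1, by omega⟩
    obtain ⟨g2, rfl⟩ : ∃ g2, f2 = g2 + 1 := ⟨f2 - 1, by omega⟩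
    by_cases hv : v = "-"
    · simp [pvRes, hv]
    · cases hc : (PySem.Dict.mk d).get? v with
      | none => simp [pvRes, hv, hc]
      | some w =>
        have hw : pvIter d m w = none := by
          rw [show m + 1 = 1 + m from by omega, pvIter_add] at h
          simpa [pvIter, pvSucc, hv, hc] using h
        simp only [pvRes, hv, if_false, hc]
        exact ih hw (by omega) (by omega)


-- ---- the invariant shape of the evolving dict / output list ----

-- entry of the finished output: key together with its resolved value
def pvRf (d : List (String × String)) (kv : String × String) : String × Option String :=
  (kv.1, pvRes d (d.length + 1) kv.2)

-- entry still holding its original value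
def pvSf (kv : String × String) : String × Option String := (kv.1, some kv.2)

theorem pvIter_step {d : List (String × String)} {v w : String} {j : Nat}
    (h : pvSucc d v = some w) : pvIter d (j+1) v = pvIter d j w := by
  simp [pvIter, h]

theorem pvSucc_of_lk {d : List (String × String)} {v w : String}
    (hv : v ≠ "-") (h : (PySem.Dict.mk d).get? v = some w) : pvSucc d v = some w := by
  simp [pvSucc, hv, h]

-- unfold pvRes one step through a key
theorem pvRes_key_step {d : List (String × String)} {v w : String} {f : Nat}
    (hv : v ≠ "-") (h : (PySem.Dict.mk d).get? v = some w) :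
    pvRes d (f+1) v = pvRes d f w := by
  simp [pvRes, hv, h]

-- under acyclicity, resolving through a key keeps the canonical fuel
theorem pvRes_key_step' {d : List (String × String)}
    (hacyc : ∀ x ∈ d.map Prod.fst, ∀ j < d.length, pvIter d (j+1) x ≠ some x)
    {v w : String} (hv : v ≠ "-") (h : (PySem.Dict.mk d).get? v = some w) :
    pvRes d (d.length + 1) v = pvRes d (d.length + 1) w := by
  have hdw : pvIter d d.length w = none := by
    have := pvIter_dead hacyc v
    rwa [pvIter_step (pvSucc_of_lk hv h)] at this
  rw [pvRes_key_step hv h]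
  exact pvRes_congr_dead hdw (by omega) (by omega)

theorem st_get?_eq {st : PySem.Dict String (Option String)} {k : String} {y : Option String}
    (hnd : (st.items.map Prod.fst).Nodup) (h : (k, y) ∈ st.items) : st.get? k = some y :=
  PySem.Dict.get?_of_mem_items _ h (by simpa [PySem.Dict.keys] using hnd)

theorem st_get?_none {st : PySem.Dict String (Option String)} {k : String}
    (h : k ∉ st.items.map Prod.fst) : st.get? k = none := by
  rw [PySem.Dict.get?_eq_none_iff_not_mem_keys]
  simpa [PySem.Dict.keys] using h

-- overwriting an existing key rewrites exactly its slot in the items list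
theorem items_insert_mid (st : PySem.Dict String (Option String))
    (A B : List (String × Option String)) (k : String) (x y : Option String)
    (hit : st.items = A ++ (k, x) :: B)
    (hnd : ((A ++ (k, x) :: B).map Prod.fst).Nodup) :
    (st.insert k y).items = A ++ (k, y) :: B := by
  have hA : ∀ p ∈ A, p.1 ≠ k := by
    intro p hp hpk
    simp only [List.map_append, List.map_cons, List.nodup_append] at hnd
    exact hnd.2.2 _ (List.mem_map_of_mem hp) (k) (by simp) (by simp [hpk])
  have hB : ∀ p ∈ B, p.1 ≠ k := by
    intro p hp hpk
    simp only [List.map_append, List.map_cons, List.nodup_append, List.nodup_cons] at hnd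
    exact hnd.2.1.1 (by rw [← hpk]; exact List.mem_map_of_mem hp)
  have hcont : st.contains k := by
    rw [PySem.Dict.contains_iff_mem_keys]
    simp [PySem.Dict.keys, hit]
  rw [PySem.Dict.items_insert_of_contains st y hcont, hit]
  simp only [List.map_append, List.map_cons]
  congr 1
  · refine List.map_congr_left ?_ |>.trans (List.map_id A)
    intro p hp
    simp [hA p hp]
  · simp only [BEq.rfl, if_true]
    congr 1
    refine List.map_congr_left ?_ |>.trans (List.map_id B)
    intro p hp
    simp [hB p hp]

-- ---- the while loop of A computes the pure resolved value (and never breaks) ----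

theorem chase_on_none (st : PySem.Dict String (Option String)) (dis : String) (fuel : Nat) :
    verboseChase st dis none fuel = (st, none) := by
  cases fuel <;> rfl

theorem chase_exit {st : PySem.Dict String (Option String)} {t : String}
    (dis : String) (fuel : Nat) (h : st.get? t = none) :
    verboseChase st dis (some t) fuel = (st, some t) := by
  cases fuel <;> simp [verboseChase, h]

theorem chase_step (st : PySem.Dict String (Option String)) (dis r : String) (fuel : Nat) :
    verboseChase st dis (some r) (fuel + 1) =
      (match st.get? r with
       | none => (st, some r)
       | some rep' =>
         if rep' = some "-" then (st.insert dis none, rep')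
         else verboseChase st dis rep' fuel) := rfl

theorem chase_eq (d : List (String × String)) (pre post : List (String × String))
    (st : PySem.Dict String (Option String)) (dis : String)
    (hnd : (d.map Prod.fst).Nodup)
    (hacyc : ∀ x ∈ d.map Prod.fst, ∀ j < d.length, pvIter d (j+1) x ≠ some x)
    (hd : d = pre ++ post)
    (hit : st.items = pre.map (pvRf d) ++ post.map pvSf) :
    ∀ (m fuel : Nat) (v : String), pvIter d m v = none → m ≤ fuel + 1 → v ≠ "-" →
      pvHit post v m = false →
      verboseChase st dis (some v) (fuel + 1) = (st, pvRes d (d.length + 1) v) := by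
  have hndst : (st.items.map Prod.fst).Nodup := by
    have : st.items.map Prod.fst = d.map Prod.fst := by
      simp [hit, hd, List.map_map, pvRf, pvSf, Function.comp_def]
    rw [this]; exact hnd
  have hndpost : (post.map Prod.fst).Nodup := by
    refine List.Nodup.of_append_right (l₁ := pre.map Prod.fst) ?_
    rw [← List.map_append, ← hd]; exact hnd
  intro m
  induction m with
  | zero => intro fuel v h; simp [pvIter] at h
  | succ m ih =>
    intro fuel v hdead hle hv hlc
    by_cases hvk : v ∈ d.map Prod.fst
    · obtain ⟨kv, hkv, hfst⟩ := List.mem_map.1 hvk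
      obtain ⟨w, hw⟩ : ∃ w, (v, w) ∈ d := ⟨kv.2, by rwa [show (v, kv.2) = kv from by rw [← hfst]] ⟩
      have hlk : (PySem.Dict.mk d).get? v = some w := pvLk_of_mem hnd hw
      have hmem2 : (v, w) ∈ pre ++ post := hd ▸ hw
      rcases List.mem_append.1 hmem2 with hpre | hpost
      · -- v was already processed: its stored value is the resolved one, a dead end
        have hg : st.get? v = some (pvRes d (d.length + 1) w) := by
          refine st_get?_eq hndst ?_
          rw [hit]
          exact List.mem_append_left _ (List.mem_map.2 ⟨(v, w), hpre, rfl⟩)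
        have hR : pvRes d (d.length + 1) v = pvRes d (d.length + 1) w :=
          pvRes_key_step' hacyc hv hlk
        have hrne : pvRes d (d.length + 1) w ≠ some "-" := pvRes_ne_dash d _ w
        rw [chase_step, hg]
        simp only [if_neg hrne]
        cases hr : pvRes d (d.length + 1) w with
        | none => rw [chase_on_none, hR, hr]
        | some t =>
          have ht : (PySem.Dict.mk d).get? t = none := pvRes_some_not_key hr
          have htk : t ∉ d.map Prod.fst := (pvLk_none_iff d t).1 ht
          rw [chase_exit dis fuel (st_get?_none (by
            simpa [hit, hd, List.map_map, pvRf, pvSf, Function.comp_def] using htk)), hR, hr]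
      · -- v is not yet processed: it still holds its original value w
        have hg : st.get? v = some (some w) := by
          refine st_get?_eq hndst ?_
          rw [hit]
          exact List.mem_append_right _ (List.mem_map.2 ⟨(v, w), hpost, rfl⟩)
        have hlkpost : (PySem.Dict.mk post).get? v = some w := pvLk_of_mem hndpost hpost
        show verboseChase st dis (some v) (fuel + 1) = _
        by_cases hwd : w = "-"
        · exfalso
          simp [pvHit, hlkpost, hwd] at hlc
        · have hsucc : pvSucc d v = some w := pvSucc_of_lk hv hlk
          have hdw : pvIter d m w = none := by rwa [pvIter_step hsucc] at hdead
          have hm1 : 1 ≤ m := by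
            rcases m with _ | m
            · simp [pvIter] at hdw
            · omega
          obtain ⟨f', rfl⟩ : ∃ f', fuel = f' + 1 := ⟨fuel - 1, by omega⟩
          have hlc' : pvHit post w m = false := by
            simpa [pvHit, hlkpost, hwd] using hlc
          have hih := ih f' w hdw (by omega) hwd hlc'
          rw [chase_step, hg]
          simp only [if_neg (show some w ≠ some "-" by simpa using hwd)]
          rw [hih, pvRes_key_step' hacyc hv hlk]
    · -- v is not a key: the loop exits with v, and v is the pure terminal
      have hnone : st.get? v = none := st_get?_none (by
        simpa [hit, hd, List.map_map, pvRf, pvSf, Function.comp_def] using hvk)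
      have hlk : (PySem.Dict.mk d).get? v = none := (pvLk_none_iff d v).2 hvk
      rw [chase_exit dis (fuel+1) hnone]
      simp [pvRes, hv, hlk]

-- ¬ D_verbose, read at the split point of the processing order
theorem notD_at {d : List (String × String)} (pre post : List (String × String))
    {k v : String} (hd : d = pre ++ (k, v) :: post) (hnD : ¬ D_verbose d) (hv : v ≠ "-") :
    pvHit ((k, v) :: post) v (d.length + 1) = false := by
  by_contra h
  exact hnD ⟨(k, v) :: post, (List.mem_tails _ _).2 ⟨pre, hd.symm⟩, by simpa using hv,
    by simpa using h⟩

-- ---- A's main loop keeps the processed prefix resolved ----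

theorem foldA_inv (d rest : List (String × String))
    (hnd : (d.map Prod.fst).Nodup)
    (hacyc : ∀ x ∈ d.map Prod.fst, ∀ j < d.length, pvIter d (j+1) x ≠ some x) :
    ∀ (mid pre : List (String × String)) (st : PySem.Dict String (Option String)),
      d = pre ++ mid ++ rest →
      st.items = pre.map (pvRf d) ++ (mid ++ rest).map pvSf →
      (∀ mid1 k2 v2 mid2, mid = mid1 ++ (k2, v2) :: mid2 → v2 ≠ "-" →
        pvHit ((k2, v2) :: (mid2 ++ rest)) v2 (d.length + 1) = false) →
      ((mid.map Prod.fst).foldl (verboseStep d.length) st).items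
        = (pre ++ mid).map (pvRf d) ++ rest.map pvSf := by
  intro mid
  induction mid with
  | nil =>
    intro pre st hd hit _
    simpa using hit
  | cons kv mid ih =>
    intro pre st hd hit hsafe
    obtain ⟨k, v⟩ := kv
    have hndst : (st.items.map Prod.fst).Nodup := by
      have : st.items.map Prod.fst = d.map Prod.fst := by
        simp [hit, hd, List.map_map, pvRf, pvSf, Function.comp_def]
      rw [this]; exact hnd
    have hg : st.get? k = some (some v) :=
      st_get?_eq hndst (by rw [hit]; exact List.mem_append_right _ (by simp [pvSf]))
    have hmid : st.items = pre.map (pvRf d) ++ (k, some v) :: (mid ++ rest).map pvSf := by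
      simpa using hit
    have hndmid : ((pre.map (pvRf d) ++ (k, some v) :: (mid ++ rest).map pvSf).map Prod.fst).Nodup := by
      rw [← hmid]; exact hndst
    have hd' : d = pre ++ (k, v) :: (mid ++ rest) := by simpa using hd
    simp only [List.map_cons, List.foldl_cons]
    by_cases hv : v = "-"
    · -- first branch of A: a direct "-" becomes None
      have hstep : verboseStep d.length st k = st.insert k none := by
        simp [verboseStep, hg, hv]
      rw [hstep]
      have := ih (pre ++ [(k, v)]) (st.insert k none) (by simp [hd]) (by
        rw [items_insert_mid st _ _ k (some v) none hmid hndmid]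
        have : pvRf d (k, v) = (k, none) := by simp [pvRf, pvRes, hv]
        simp [this]) (by
        intro mid1 k2 v2 mid2 hsplit hv2
        exact hsafe ((k, v) :: mid1) k2 v2 mid2 (by simp [hsplit]) hv2)
      simpa using this
    · -- the while loop: returns the resolved value, st untouched
      have hchase : verboseChase st k (some v) (d.length + 2) =
          (st, pvRes d (d.length + 1) v) := by
        refine chase_eq d pre ((k, v) :: (mid ++ rest)) st k hnd hacyc hd' (by simpa using hit)
          (d.length + 1) (d.length + 1) v (pvIter_dead hacyc v) (by omega) hv ?_
        exact hsafe [] k v mid rfl hv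
      have hstep : verboseStep d.length st k = st.insert k (pvRes d (d.length + 1) v) := by
        simp only [verboseStep, hg, if_neg (show some v ≠ some "-" by simpa using hv), hchase]
      rw [hstep]
      have := ih (pre ++ [(k, v)]) _ (by simp [hd]) (by
        rw [items_insert_mid st _ _ k (some v) (pvRes d (d.length + 1) v) hmid hndmid]
        simp [pvRf]) (by
        intro mid1 k2 v2 mid2 hsplit hv2
        exact hsafe ((k, v) :: mid1) k2 v2 mid2 (by simp [hsplit]) hv2)
      simpa using this

theorem foldA (d : List (String × String))
    (hnd : (d.map Prod.fst).Nodup)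
    (hacyc : ∀ x ∈ d.map Prod.fst, ∀ j < d.length, pvIter d (j+1) x ≠ some x)
    (hnD : ¬ D_verbose d) :
    ∀ (post pre : List (String × String)) (st : PySem.Dict String (Option String)),
      d = pre ++ post →
      st.items = pre.map (pvRf d) ++ post.map pvSf →
      ((post.map Prod.fst).foldl (verboseStep d.length) st).items = d.map (pvRf d) := by
  intro post pre st hd hit
  have := foldA_inv d [] hnd hacyc post pre st (by simpa using hd) (by simpa using hit) (by
    intro mid1 k2 v2 mid2 hsplit hv2
    have hd2 : d = (pre ++ mid1) ++ (k2, v2) :: mid2 := by simp [hd, hsplit]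
    have := notD_at (pre ++ mid1) mid2 hd2 hnD hv2
    simpa using this)
  have h2 : ((post.map Prod.fst).foldl (verboseStep d.length) st).items
      = pre.map (pvRf d) ++ post.map (pvRf d) := by simpa using this
  rw [h2, ← List.map_append, ← hd]

-- ---- B's memo only ever holds correctly resolved keys ----

def pvMemoOK (d : List (String × String)) (memo : PySem.Dict String (Option String)) : Prop :=
  ∀ x r, memo.get? x = some r → ∃ w, (x, w) ∈ d ∧ r = pvRes d (d.length + 1) w

theorem resolveB_eq (d : List (String × String))
    (hnd : (d.map Prod.fst).Nodup)
    (hacyc : ∀ x ∈ d.map Prod.fst, ∀ j < d.length, pvIter d (j+1) x ≠ some x) :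
    ∀ (m fuel : Nat) (k w : String) (memo : PySem.Dict String (Option String)),
      (k, w) ∈ d → pvIter d m w = none → m ≤ fuel → pvMemoOK d memo →
      (resolveB (PySem.Dict.mk d) memo k fuel).2 = pvRes d (d.length + 1) w ∧
      pvMemoOK d (resolveB (PySem.Dict.mk d) memo k fuel).1 := by
  intro m
  induction m with
  | zero => intro fuel k w memo _ h; simp [pvIter] at h
  | succ m ih =>
    intro fuel k w memo hkw hdead hle hmemo
    obtain ⟨f, rfl⟩ : ∃ f, fuel = f + 1 := ⟨fuel - 1, by omega⟩
    have hlk : (PySem.Dict.mk d).get? k = some w := pvLk_of_mem hnd hkw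
    cases hm : memo.get? k with
    | some r =>
      obtain ⟨w', hw', hr⟩ := hmemo k r hm
      have : w' = w := by
        have h2 := pvLk_of_mem hnd hw'
        rw [hlk] at h2
        exact Option.some_inj.mp h2.symm
      subst this
      constructor
      · simp [resolveB, hm, hr]
      · simpa [resolveB, hm] using hmemo
    | none =>
      by_cases hwd : w = "-"
      · have hres : resolveB (PySem.Dict.mk d) memo k (f+1) = (memo.insert k none, none) := by
          simp [resolveB, hm, hlk, hwd]
        rw [hres]
        constructor
        · simp [hwd, pvRes]
        · intro x r hx
          by_cases hxk : x = k
          · subst hxk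
            rw [PySem.Dict.get?_insert_self] at hx
            obtain rfl : none = r := Option.some_inj.mp hx
            exact ⟨w, hkw, by simp [hwd, pvRes]⟩
          · rw [PySem.Dict.get?_insert_of_ne _ _ hxk] at hx
            exact hmemo x r hx
      · by_cases hwk : w ∈ d.map Prod.fst
        · -- w is itself a key: recurse
          obtain ⟨kv2, hkv2, hfst2⟩ := List.mem_map.1 hwk
          obtain ⟨u, hu⟩ : ∃ u, (w, u) ∈ d := ⟨kv2.2, by rwa [show (w, kv2.2) = kv2 from by rw [← hfst2]]⟩
          have hcont : (PySem.Dict.mk d).contains w := by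
            rw [PySem.Dict.contains_iff_mem_keys]; simpa [PySem.Dict.keys_mk] using hwk
          have hsucc : pvSucc d w = some u := pvSucc_of_lk hwd (pvLk_of_mem hnd hu)
          have hdu : pvIter d m u = none := by rwa [pvIter_step hsucc] at hdead
          have hih := ih f w u memo hu hdu (by omega) hmemo
          have hres : resolveB (PySem.Dict.mk d) memo k (f+1) =
              ((resolveB (PySem.Dict.mk d) memo w f).1.insert k
                (resolveB (PySem.Dict.mk d) memo w f).2,
               (resolveB (PySem.Dict.mk d) memo w f).2) := by
            simp [resolveB, hm, hlk, hwd, hcont]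
          rw [hres]
          have hR : pvRes d (d.length + 1) w = pvRes d (d.length + 1) u :=
            pvRes_key_step' hacyc hwd (pvLk_of_mem hnd hu)
          constructor
          · simp only [hih.1, hR]
          · intro x r hx
            by_cases hxk : x = k
            · subst hxk
              rw [PySem.Dict.get?_insert_self] at hx
              obtain rfl := Option.some_inj.mp hx
              exact ⟨w, hkw, by rw [hih.1, hR]⟩
            · rw [PySem.Dict.get?_insert_of_ne _ _ hxk] at hx
              exact hih.2 x r hx
        · -- w is a terminal value
          have hlkw : (PySem.Dict.mk d).get? w = none := (pvLk_none_iff d w).2 hwk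
          have hcont : (PySem.Dict.mk d).contains w = false := by
            rw [PySem.Dict.contains_eq_isSome_get?, hlkw]; rfl
          have hres : resolveB (PySem.Dict.mk d) memo k (f+1) =
              (memo.insert k (some w), some w) := by
            simp [resolveB, hm, hlk, hwd, hcont]
          rw [hres]
          have hRw : pvRes d (d.length + 1) w = some w := by simp [pvRes, hwd, hlkw]
          constructor
          · exact hRw.symm
          · intro x r hx
            by_cases hxk : x = k
            · subst hxk
              rw [PySem.Dict.get?_insert_self] at hx
              obtain rfl := Option.some_inj.mp hx
              exact ⟨w, hkw, hRw.symm⟩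
            · rw [PySem.Dict.get?_insert_of_ne _ _ hxk] at hx
              exact hmemo x r hx

-- ---- B's main loop writes the resolved value for each key, in order ----

theorem foldB (d : List (String × String))
    (hnd : (d.map Prod.fst).Nodup)
    (hacyc : ∀ x ∈ d.map Prod.fst, ∀ j < d.length, pvIter d (j+1) x ≠ some x) :
    ∀ (post pre : List (String × String)) (memo : PySem.Dict String (Option String))
      (acc : List (String × Option String)),
      d = pre ++ post → pvMemoOK d memo → acc = pre.map (pvRf d) →
      ((post.map Prod.fst).foldl (verboseAltStep (PySem.Dict.mk d) d.length) (memo, acc)).2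
        = d.map (pvRf d) := by
  intro post
  induction post with
  | nil =>
    intro pre memo acc hd hmemo hacc
    simp only [List.map_nil, List.foldl_nil]
    rw [hacc, hd]; simp
  | cons kv post ih =>
    intro pre memo acc hd hmemo hacc
    obtain ⟨k, v⟩ := kv
    have hkv : (k, v) ∈ d := by rw [hd]; simp
    have hres := resolveB_eq d hnd hacyc (d.length + 1) (d.length + 2) k v memo hkv
      (pvIter_dead hacyc v) (by omega) hmemo
    simp only [List.map_cons, List.foldl_cons]
    have hstep : verboseAltStep (PySem.Dict.mk d) d.length (memo, acc) k =
        ((resolveB (PySem.Dict.mk d) memo k (d.length + 2)).1,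
         acc ++ [(k, pvRes d (d.length + 1) v)]) := by
      simp [verboseAltStep, hres.1]
    rw [hstep]
    refine ih (pre ++ [(k, v)]) _ _ (by simp [hd]) hres.2 ?_
    simp [hacc, pvRf]

theorem pvMemoOK_empty (d : List (String × String)) : pvMemoOK d PySem.Dict.empty := by
  intro x r h
  simp [PySem.Dict.get?_empty] at h

theorem verbose_alt_eq (d : List (String × String))
    (hnd : (d.map Prod.fst).Nodup)
    (hacyc : ∀ x ∈ d.map Prod.fst, ∀ j < d.length, pvIter d (j+1) x ≠ some x) :
    verbose_alt d = d.map (pvRf d) := by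
  show (((PySem.Dict.mk d).keys).foldl
    (verboseAltStep (PySem.Dict.mk d) d.length) (PySem.Dict.empty, [])).2 = d.map (pvRf d)
  rw [PySem.Dict.keys_mk]
  exact foldB d hnd hacyc d [] PySem.Dict.empty [] rfl (pvMemoOK_empty d) rfl

-- ---- tightness: inside D_verbose the two programs really differ ----

-- the witness condition of D_verbose, indexed by the position of the suffix
def pvHitAt (d : List (String × String)) (i : Nat) : Prop :=
  ((d.drop i).headD ("", "")).2 ≠ "-" ∧
    pvHit (d.drop i) ((d.drop i).headD ("", "")).2 (d.length + 1) = true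

-- A's while loop, on a chain that stays in the unprocessed suffix s and meets "-",
-- marks dis None and breaks with rep = "-"
theorem chase_hits (d pre s : List (String × String))
    (st : PySem.Dict String (Option String)) (dis : String)
    (hnd : (d.map Prod.fst).Nodup)
    (hd : d = pre ++ s)
    (hit : st.items = pre.map (pvRf d) ++ s.map pvSf) :
    ∀ (f fuel : Nat) (v : String), v ≠ "-" → f ≤ fuel → pvHit s v f = true →
      verboseChase st dis (some v) fuel = (st.insert dis none, some "-") := by
  have hndst : (st.items.map Prod.fst).Nodup := by
    have : st.items.map Prod.fst = d.map Prod.fst := by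
      simp [hit, hd, List.map_map, pvRf, pvSf, Function.comp_def]
    rw [this]; exact hnd
  have hgpost : ∀ {x w : String}, (x, w) ∈ s → st.get? x = some (some w) := by
    intro x w hxw
    refine st_get?_eq hndst ?_
    rw [hit]
    exact List.mem_append_right _ (List.mem_map.2 ⟨(x, w), hxw, rfl⟩)
  intro f
  induction f with
  | zero => intro fuel v _ _ hhit; simp [pvHit] at hhit
  | succ f ih =>
    intro fuel v hv hle hhit
    cases hlkv : (PySem.Dict.mk s).get? v with
    | none => rw [pvHit, hlkv] at hhit; simp at hhit
    | some w =>
      have hmemv : (v, w) ∈ s := by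
        simpa using PySem.Dict.mem_items_of_get?_eq_some _ hlkv
      obtain ⟨g, rfl⟩ : ∃ g, fuel = g + 1 := ⟨fuel - 1, by omega⟩
      by_cases hwd : w = "-"
      · rw [chase_step, hgpost hmemv, hwd]
        simp
      · rw [chase_step, hgpost hmemv]
        simp only [if_neg (show some w ≠ some "-" by simpa using hwd)]
        refine ih g w hwd (by omega) ?_
        rw [pvHit, hlkv] at hhit
        simpa [hwd] using hhit

theorem chase_p1 (st : PySem.Dict String (Option String)) (dis : String) :
    ∀ (fuel : Nat) (rep : Option String),
      (verboseChase st dis rep fuel).1 = st ∨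
      (verboseChase st dis rep fuel).1 = st.insert dis none := by
  intro fuel
  induction fuel with
  | zero => intro rep; left; rfl
  | succ fuel ih =>
    intro rep
    cases rep with
    | none => left; rfl
    | some r =>
      cases h : st.get? r with
      | none => left; simp [verboseChase, h]
      | some rep' =>
        by_cases hdash : rep' = some "-"
        · right; simp [verboseChase, h, hdash]
        · have := ih rep'
          simpa [verboseChase, h, hdash] using this

-- keys never touched again keep their stored value through the rest of the loop
theorem foldSkip (n : Nat) :
    ∀ (ks : List String) (st : PySem.Dict String (Option String)) (k : String), k ∉ ks →
      ((ks.foldl (verboseStep n) st)).get? k = st.get? k := by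
  intro ks
  induction ks with
  | nil => intro st k _; rfl
  | cons dis ks ih =>
    intro st k hk
    have hne : k ≠ dis := by intro h; exact hk (by simp [h])
    have hks : k ∉ ks := by intro h; exact hk (by simp [h])
    rw [List.foldl_cons, ih _ k hks]
    cases hg : st.get? dis with
    | none => simp [verboseStep, hg]
    | some rep =>
      by_cases hdash : rep = some "-"
      · simp [verboseStep, hg, hdash, PySem.Dict.get?_insert_of_ne _ _ hne]
      · simp only [verboseStep, hg, if_neg hdash]
        rw [PySem.Dict.get?_insert_of_ne _ _ hne]
        rcases chase_p1 st dis (n+2) rep with h1 | h1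
        · rw [h1]
        · rw [h1]
          exact PySem.Dict.get?_insert_of_ne _ _ hne

theorem verbose_spec : Claim_unchanged_verbose := by
  intro d _hdom hpre hnD
  obtain ⟨hnd, hacyc⟩ := hpre
  show verbose d = verbose_alt d
  have hA : verbose d = d.map (pvRf d) := by
    show ((PySem.Dict.mk (d.map (fun kv => (kv.1, some kv.2)))).keys.foldl
      (verboseStep d.length) (PySem.Dict.mk (d.map (fun kv => (kv.1, some kv.2))))).items
        = d.map (pvRf d)
    have hkeys0 : (PySem.Dict.mk (d.map (fun kv => (kv.1, some kv.2)))).keys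
        = d.map Prod.fst := by
      simp [PySem.Dict.keys_mk, List.map_map, Function.comp_def]
    rw [hkeys0]
    exact foldA d hnd hacyc hnD d [] _ rfl (by simp [pvSf])
  rw [hA, verbose_alt_eq d hnd hacyc]
theorem verbose_changed : Claim_changed_verbose := by unfold Claim_changed_verbose; decide
theorem verbose_tight : Claim_exact_verbose := by
  intro d _hdom hpre hD
  obtain ⟨hnd, hacyc⟩ := hpre
  have hQ : ∃ i, pvHitAt d i := by
    obtain ⟨s, hs, hv0, hhit⟩ := hD
    obtain ⟨pre, hpre'⟩ := (List.mem_tails _ _).1 hs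
    refine ⟨pre.length, ?_⟩
    have hdrop : d.drop pre.length = s := by rw [← hpre']; exact List.drop_left
    rw [pvHitAt, hdrop]
    exact ⟨hv0, hhit⟩
  haveI : DecidablePred (pvHitAt d) := fun i => by unfold pvHitAt; infer_instance
  have hQ0 : pvHitAt d (Nat.find hQ) := Nat.find_spec hQ
  have hmin : ∀ i' < Nat.find hQ, ¬ pvHitAt d i' := fun i' h' => Nat.find_min hQ h'
  have hd : d = d.take (Nat.find hQ) ++ d.drop (Nat.find hQ) := (List.take_append_drop _ d).symm
  cases hs : d.drop (Nat.find hQ) with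
  | nil =>
    exfalso
    obtain ⟨_, hhit⟩ := hQ0
    rw [hs] at hhit
    simp [pvHit, PySem.Dict.get?] at hhit
  | cons kv s' =>
    obtain ⟨k, v⟩ := kv
    have hv : v ≠ "-" := by have := hQ0.1; rw [hs] at this; simpa using this
    have hhit := hQ0.2
    rw [hs] at hhit
    have hilen : Nat.find hQ < d.length := by
      by_contra hle
      have : d.drop (Nat.find hQ) = [] := List.drop_eq_nil_of_le (by omega)
      rw [hs] at this; exact absurd this (by simp)
    have hprelen : (d.take (Nat.find hQ)).length = Nat.find hQ := by
      rw [List.length_take]; omega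
    have hd' : d = d.take (Nat.find hQ) ++ (k, v) :: s' := by rw [← hs]; exact hd
    -- process the keys before the witness: the invariant holds there (no earlier hit)
    have hst1 : (((d.take (Nat.find hQ)).map Prod.fst).foldl (verboseStep d.length)
        (PySem.Dict.mk (d.map (fun kv => (kv.1, some kv.2))))).items
          = (d.take (Nat.find hQ)).map (pvRf d) ++ ((k, v) :: s').map pvSf := by
      have := foldA_inv d ((k, v) :: s') hnd hacyc (d.take (Nat.find hQ)) []
        (PySem.Dict.mk (d.map (fun kv => (kv.1, some kv.2))))
        (by simpa using hd') (by simp only [List.map_nil, List.nil_append, ← hd']; rfl) ?_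
      · simpa using this
      · intro mid1 k2 v2 mid2 hsplit hv2
        by_contra hcontra
        have hd2 : d = mid1 ++ ((k2, v2) :: (mid2 ++ ((k, v) :: s'))) := by
          rw [hd']; rw [hsplit]; simp
        have hdrop2 : d.drop mid1.length = (k2, v2) :: (mid2 ++ ((k, v) :: s')) := by
          conv_lhs => rw [hd2]
          exact List.drop_left
        have hlt : mid1.length < Nat.find hQ := by
          have hlen2 := congrArg List.length hsplit
          rw [hprelen] at hlen2
          simp [List.length_append] at hlen2
          omega
        refine hmin mid1.length hlt ⟨?_, ?_⟩
        · rw [hdrop2]; simpa using hv2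
        · rw [hdrop2]
          simpa using hcontra
    -- the witness key's chase breaks on "-" and A stores the literal "-"
    have hndst1 : ((((d.take (Nat.find hQ)).map (pvRf d)
        ++ ((k, v) :: s').map pvSf)).map Prod.fst).Nodup := by
      have h1 : ((d.take (Nat.find hQ)).map (pvRf d)).map Prod.fst
          = (d.take (Nat.find hQ)).map Prod.fst := by rw [List.map_map]; rfl
      have h2 : (((k, v) :: s').map pvSf).map Prod.fst = ((k, v) :: s').map Prod.fst := by
        rw [List.map_map]; rfl
      rw [List.map_append, h1, h2, ← List.map_append, ← hd']
      exact hnd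
    have hg : (((d.take (Nat.find hQ)).map Prod.fst).foldl (verboseStep d.length)
        (PySem.Dict.mk (d.map (fun kv => (kv.1, some kv.2))))).get? k = some (some v) := by
      refine st_get?_eq (by rw [hst1]; exact hndst1) ?_
      rw [hst1]
      exact List.mem_append_right _ (by simp [pvSf])
    have hchase := chase_hits d (d.take (Nat.find hQ)) ((k, v) :: s') _ k hnd hd' hst1
      (d.length + 1) (d.length + 2) v hv (by omega) hhit
    have hstep : verboseStep d.length
        (((d.take (Nat.find hQ)).map Prod.fst).foldl (verboseStep d.length)
          (PySem.Dict.mk (d.map (fun kv => (kv.1, some kv.2))))) k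
        = (((d.take (Nat.find hQ)).map Prod.fst).foldl (verboseStep d.length)
          (PySem.Dict.mk (d.map (fun kv => (kv.1, some kv.2))))).insert k (some "-") := by
      simp only [verboseStep, hg, if_neg (show some v ≠ some "-" by simpa using hv), hchase]
      exact PySem.Dict.insert_insert_self _ _ _ _
    -- the later keys never touch k again
    have hknot : k ∉ s'.map Prod.fst := by
      have h1 : (d.map Prod.fst).Nodup := hnd
      rw [hd'] at h1
      have h2 := (List.nodup_append.mp (by simpa using h1)).2.1
      exact (List.nodup_cons.mp h2).1
    have hkeys : (PySem.Dict.mk (d.map (fun kv => (kv.1, some kv.2)))).keys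
        = (d.take (Nat.find hQ)).map Prod.fst ++ k :: s'.map Prod.fst := by
      rw [PySem.Dict.keys_mk, List.map_map]
      show d.map Prod.fst = _
      conv_lhs => rw [hd']
      rw [List.map_append, List.map_cons]
    -- A's output contains (k, some "-")
    have hmemA : (k, some "-") ∈ verbose d := by
      have hverb : verbose d = ((s'.map Prod.fst).foldl (verboseStep d.length)
          ((((d.take (Nat.find hQ)).map Prod.fst).foldl (verboseStep d.length)
            (PySem.Dict.mk (d.map (fun kv => (kv.1, some kv.2))))).insert k (some "-"))).items := by
        show ((PySem.Dict.mk (d.map (fun kv => (kv.1, some kv.2)))).keys.foldl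
          (verboseStep d.length) (PySem.Dict.mk (d.map (fun kv => (kv.1, some kv.2))))).items = _
        rw [hkeys, List.foldl_append, List.foldl_cons, hstep]
      rw [hverb]
      refine PySem.Dict.mem_items_of_get?_eq_some _ ?_
      rw [foldSkip d.length (s'.map Prod.fst) _ k hknot]
      exact PySem.Dict.get?_insert_self _ _ _
    -- but B's output never stores the literal "-"
    intro heq
    rw [heq, verbose_alt_eq d hnd hacyc] at hmemA
    obtain ⟨kv2, _, heq2⟩ := List.mem_map.1 hmemA
    have : pvRes d (d.length + 1) kv2.2 = some "-" := congrArg Prod.snd heq2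
    exact pvRes_ne_dash d _ _ this
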